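-- pv_equiv track=rewrite | github.com/Vishesh1060/Circuit-element-Executable | Code_Generation/trialgenerator2.py | partialcheck
-- ===== SOURCE A (Python) =====
-- def partialcheck(inputs):
--     tempjoinstring=''
--     for val in inputs:
--         tempjoinstring=tempjoinstring+str(val)
--     if tempjoinstring.find('i')!=-1 and tempjoinstring.find('G')!=-1:
--         return True
--     else:
--         return False
-- ===== SOURCE B (Python) =====
-- def partialcheck(inputs):
--     has_i = False
--     has_G = False
--     for val in inputs:
--         s = str(val)
--         if 'i' in s:
--             has_i = True
--         if 'G' in s:
--             has_G = True
--         if has_i and has_G: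
--             return True
--     return False
-- ===== Notes on version B (the rewrite author's own statement) =====
-- stated objective: simpler
-- what changed: One pass keeping two booleans with an early exit instead of building the concatenated string and running two find() scans over it; single characters cannot span element boundaries, so per-element membership equals searching the concatenation.
import Mathlib
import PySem

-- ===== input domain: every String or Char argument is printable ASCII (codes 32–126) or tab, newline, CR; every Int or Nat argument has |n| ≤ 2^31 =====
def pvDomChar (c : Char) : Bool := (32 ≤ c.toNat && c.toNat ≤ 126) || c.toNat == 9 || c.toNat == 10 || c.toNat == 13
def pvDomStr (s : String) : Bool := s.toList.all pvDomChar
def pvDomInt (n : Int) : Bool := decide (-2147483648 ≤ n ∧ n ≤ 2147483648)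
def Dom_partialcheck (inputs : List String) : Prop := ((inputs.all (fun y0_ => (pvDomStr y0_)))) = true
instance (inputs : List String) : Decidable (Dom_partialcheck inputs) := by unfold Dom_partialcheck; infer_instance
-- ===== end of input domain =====

-- B replaces A's "concatenate everything, then find() twice" with a single pass
-- keeping two booleans and an early exit (objective: simpler).

-- ===== PORT A =====
def partialcheck (inputs : List String) : Bool :=
  let tempjoinstring := inputs.foldl (fun acc val => acc ++ val) ""
  if PySem.Str.find tempjoinstring "i" ≠ -1 ∧ PySem.Str.find tempjoinstring "G" ≠ -1 then
    true
  else
    false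

-- ===== PORT B =====
def pcGo : List String → Bool → Bool → Bool
  | [], _, _ => false
  | val :: rest, hasI, hasG =>
    let hasI' := if PySem.Str.isIn "i" val then true else hasI
    let hasG' := if PySem.Str.isIn "G" val then true else hasG
    if hasI' && hasG' then true else pcGo rest hasI' hasG'

def partialcheck_alt (inputs : List String) : Bool :=
  pcGo inputs false false

-- ===== PRECONDITION & SPEC =====
def Spec_partialcheck (inputs : List String) (out : Bool) : Prop := out = partialcheck_alt inputs
instance (inputs : List String) (out : Bool) : Decidable (Spec_partialcheck inputs out) := by unfold Spec_partialcheck; infer_instance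

-- ===== CLAIM (what is proved, stated in full; the proofs are below) =====
def Claim_equal_partialcheck : Prop := ∀ (inputs : List String), Dom_partialcheck inputs → Spec_partialcheck inputs (partialcheck inputs)

-- ===== LEMMAS AND PROOFS =====

-- characters of A's concatenation
lemma mem_foldl_append (inputs : List String) (s : String) (c : Char) :
    c ∈ (inputs.foldl (fun acc val => acc ++ val) s).toList ↔
      c ∈ s.toList ∨ inputs.any (fun v => decide (c ∈ v.toList)) = true := by
  induction inputs generalizing s with
  | nil => simp
  | cons v rest ih =>
    simp [List.foldl_cons, ih, String.toList_append, List.mem_append, or_assoc]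

-- a one-character substring occurs iff the character is a member
lemma infix_single_iff (ch : Char) (l : List Char) : [ch] <:+: l ↔ ch ∈ l := by
  constructor
  · intro h; exact h.subset (by simp)
  · intro h
    obtain ⟨l1, r, hl⟩ := List.append_of_mem h
    exact ⟨l1, r, by simp [hl]⟩

-- A's find on the concatenation, characterised element-wise
lemma find_ne_iff_any (inputs : List String) (ch : Char) :
    (PySem.Chars.find (inputs.foldl (fun acc val => acc ++ val) "").toList [ch] ≠ -1)
      ↔ inputs.any (fun v => PySem.Chars.isIn [ch] v.toList) = true := by
  rw [PySem.Chars.find_ne_neg_one_iff, infix_single_iff, mem_foldl_append]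
  simp [PySem.Chars.isIn_iff_infix, infix_single_iff]

-- B's loop computes the conjunction of the two accumulated flag-or-scan values,
-- provided it is not entered with both flags already set
lemma pcGo_eq (inputs : List String) (hasI hasG : Bool) (h : ¬(hasI = true ∧ hasG = true)) :
    pcGo inputs hasI hasG =
      ((hasI || inputs.any (fun v => PySem.Str.isIn "i" v)) &&
       (hasG || inputs.any (fun v => PySem.Str.isIn "G" v))) := by
  induction inputs generalizing hasI hasG with
  | nil =>
    simp only [pcGo, List.any_nil, Bool.or_false]
    cases hasI <;> cases hasG <;> simp_all
  | cons v rest ih =>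
    simp only [pcGo, List.any_cons]
    by_cases hb : ((if PySem.Str.isIn "i" v then true else hasI) &&
                   (if PySem.Str.isIn "G" v then true else hasG)) = true
    · rw [if_pos hb]
      cases hi : PySem.Str.isIn "i" v <;> cases hg : PySem.Str.isIn "G" v <;>
        simp_all
    · rw [if_neg hb, ih _ _ (by simpa using hb)]
      cases hi : PySem.Str.isIn "i" v <;> cases hg : PySem.Str.isIn "G" v <;>
        simp_all

-- ===== VERDICT (by name: the statement is the Claim_ definition above) =====
theorem partialcheck_spec : Claim_equal_partialcheck := by
  intro inputs _
  unfold Spec_partialcheck partialcheck partialcheck_alt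
  rw [pcGo_eq inputs false false (by simp)]
  have ti : ("i" : String).toList = ['i'] := rfl
  have tg : ("G" : String).toList = ['G'] := rfl
  simp only [PySem.Str.find_eq, PySem.Str.isIn_eq, Bool.false_or, ti, tg]
  have hi := find_ne_iff_any inputs 'i'
  have hg := find_ne_iff_any inputs 'G'
  by_cases h1 : (inputs.any (fun v => PySem.Chars.isIn ['i'] v.toList)) = true <;>
    by_cases h2 : (inputs.any (fun v => PySem.Chars.isIn ['G'] v.toList)) = true <;>
      simp_all
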